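-- pv_equiv track=rewrite | github.com/yeoseojeong/python_study | programmers/부족한 금액 계산하기.py | solution
-- ===== SOURCE A (Python) =====
-- def solution(price, money, count):
--     total_cost = 0
--
--     for i in range(1, count + 1):
--         total_cost += price * i
--
--     answer = total_cost - money
--
--     if answer < 0:
--         return 0
--
--     return answer
-- ===== SOURCE B (Python) =====
-- def solution(price, money, count):
--     n = count if count > 0 else 0
--     shortfall = price * n * (n + 1) // 2 - money
--     return shortfall if shortfall > 0 else 0
-- ===== Notes on version B (the rewrite author's own statement) =====
-- stated objective: faster
-- what changed: Replaces the O(count) accumulation loop with the closed-form arithmetic series price*n*(n+1)//2.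
import Mathlib
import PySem

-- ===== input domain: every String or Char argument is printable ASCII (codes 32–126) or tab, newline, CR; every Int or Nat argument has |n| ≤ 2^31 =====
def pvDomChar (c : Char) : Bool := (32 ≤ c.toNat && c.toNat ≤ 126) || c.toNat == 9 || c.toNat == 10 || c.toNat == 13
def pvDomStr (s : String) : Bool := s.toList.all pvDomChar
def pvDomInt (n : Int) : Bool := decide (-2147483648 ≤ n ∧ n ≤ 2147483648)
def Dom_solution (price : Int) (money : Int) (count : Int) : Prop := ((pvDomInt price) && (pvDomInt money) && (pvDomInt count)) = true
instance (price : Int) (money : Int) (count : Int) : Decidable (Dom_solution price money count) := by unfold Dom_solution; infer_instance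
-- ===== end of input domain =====

-- B replaces A's O(count) accumulation loop with the closed-form series price*n*(n+1)//2 (objective: faster, asymptotic).

-- ===== PORT A =====
def solution (price : Int) (money : Int) (count : Int) : Int :=
  let total_cost := (PySem.List.pyRange 1 (count + 1) 1).foldl (fun acc i => acc + price * i) 0
  let answer := total_cost - money
  if answer < 0 then 0 else answer

-- ===== PORT B =====
def solution_alt (price : Int) (money : Int) (count : Int) : Int :=
  let n := if count > 0 then count else 0
  let shortfall := PySem.Int.floordiv (price * n * (n + 1)) 2 - money
  if shortfall > 0 then shortfall else 0

-- ===== PRECONDITION & SPEC =====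
def Spec_solution (price : Int) (money : Int) (count : Int) (out : Int) : Prop := out = solution_alt price money count
instance (price : Int) (money : Int) (count : Int) (out : Int) : Decidable (Spec_solution price money count out) := by unfold Spec_solution; infer_instance

-- ===== CLAIM (what is proved, stated in full; the proofs are below) =====
def Claim_equal_solution : Prop := ∀ (price : Int) (money : Int) (count : Int), Dom_solution price money count → Spec_solution price money count (solution price money count)

-- ===== LEMMAS AND PROOFS =====

-- twice the loop's sum equals price*c*(c+1) for c ≥ 0
theorem pv_two_mul_foldl (price : Int) : ∀ (n : Nat),
    2 * ((PySem.List.pyRange 1 ((n : Int) + 1) 1).foldl (fun acc i => acc + price * i) 0) =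
      price * (n : Int) * ((n : Int) + 1) := by
  intro n
  induction n with
  | zero => simp [PySem.List.pyRange_one_eq_nil]
  | succ k ih =>
      rw [show ((k + 1 : Nat) : Int) + 1 = ((k : Int) + 1) + 1 by push_cast; ring,
          PySem.List.pyRange_one_succ_right (by omega)]
      simp only [List.foldl_append, List.foldl_cons, List.foldl_nil]
      rw [mul_add, ih]
      push_cast
      ring

theorem pv_loop_closed (price : Int) (n : Nat) :
    (PySem.List.pyRange 1 ((n : Int) + 1) 1).foldl (fun acc i => acc + price * i) 0 =
      PySem.Int.floordiv (price * (n : Int) * ((n : Int) + 1)) 2 := by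
  rw [PySem.Int.floordiv_eq_ediv_of_pos (by norm_num), ← pv_two_mul_foldl price n]
  omega

-- ===== VERDICT (by name: the statement is the Claim_ definition above) =====
theorem solution_spec : Claim_equal_solution := by
  unfold Claim_equal_solution
  intro price money count _
  unfold Spec_solution solution solution_alt
  by_cases h : count > 0
  · obtain ⟨n, rfl⟩ : ∃ n : Nat, count = (n : Int) := ⟨count.toNat, by omega⟩
    simp only [if_pos h, pv_loop_closed price n]
    omega
  · have hnil : PySem.List.pyRange 1 (count + 1) 1 = [] :=
      PySem.List.pyRange_one_eq_nil (by omega)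
    simp only [if_neg h, hnil, List.foldl_nil]
    have : PySem.Int.floordiv (price * 0 * (0 + 1)) 2 = 0 := by
      rw [PySem.Int.floordiv_eq_ediv_of_pos (by norm_num)]; norm_num
    rw [this]
    omega
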